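-- pv_equiv track=rewrite | github.com/pangxl/open-instruct | open_instruct/if_functions.py | verify_bullet_points
-- ===== SOURCE A (Python) =====
-- def verify_bullet_points(text: str, N: int) -> tuple[bool, str]:
-- 	"""
-- 	Verifies if a text contains exactly N bullet points in markdown format.
-- 	Returns a tuple of (is_valid, message).
--
-- 	Args:
-- 		text (str): The text to check
-- 		expected_count (int): The expected number of bullet points
--
-- 	Returns:
-- 		tuple[bool, str]: (True if constraint is met, explanation message)
-- 	"""
-- 	# Split text into lines and count lines starting with * or -
-- 	lines = text.split('\n')
-- 	bullet_points = [line.strip() for line in lines if line.strip().startswith(('*', '-'))]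
-- 	actual_count = len(bullet_points)
--
-- 	if actual_count == N:
-- 		return True
-- 	else:
-- 		return False
-- ===== SOURCE B (Python) =====
-- def verify_bullet_points(text: str, N: int) -> tuple[bool, str]:
--     # Single-pass character state machine: count lines whose first
--     # non-whitespace character is '*' or '-', without building line lists.
--     count = 0
--     seeking = True  # still inside the leading whitespace of the current line
--     for ch in text:
--         if ch == '\n':
--             seeking = True
--         elif seeking and ch not in ' \t\r\f\v':
--             if ch == '*' or ch == '-':
--                 count += 1
--             seeking = False
--     return count == N
-- ===== Notes on version B (the rewrite author's own statement) =====
-- stated objective: alternative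
-- what changed: Replaced split('\n')/strip()/list-comprehension with a single-pass character state machine that counts lines whose first non-whitespace character is '*' or '-', building no intermediate line list.
import Mathlib
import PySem

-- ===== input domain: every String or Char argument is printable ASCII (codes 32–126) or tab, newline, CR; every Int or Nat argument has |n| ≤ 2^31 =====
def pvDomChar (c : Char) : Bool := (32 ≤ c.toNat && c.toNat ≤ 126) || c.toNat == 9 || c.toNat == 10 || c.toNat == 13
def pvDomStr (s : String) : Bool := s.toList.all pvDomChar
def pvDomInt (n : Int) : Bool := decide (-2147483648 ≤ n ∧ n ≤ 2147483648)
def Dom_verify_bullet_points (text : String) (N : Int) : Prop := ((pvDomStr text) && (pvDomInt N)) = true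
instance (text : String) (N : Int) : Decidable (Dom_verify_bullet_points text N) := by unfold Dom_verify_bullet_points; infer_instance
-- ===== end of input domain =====

-- B replaces A's split/strip/comprehension by a single-pass character state machine
-- (alternative decomposition, same O(n) cost); both return the bare Bool A actually returns.

-- ===== PORT A =====
-- lines = text.split('\n'); bullet_points = [line.strip() for line in lines if line.strip().startswith(('*','-'))]
def verify_bullet_points (text : String) (N : Int) : Bool :=
  let lines := PySem.Chars.splitOn text.toList ['\n']
  let bullet_points :=
    (lines.filter (fun line =>
      PySem.Chars.startswith (PySem.Chars.strip line) ['*'] ||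
      PySem.Chars.startswith (PySem.Chars.strip line) ['-'])).map PySem.Chars.strip
  decide ((bullet_points.length : Int) = N)

-- ===== PORT B =====
-- one step of B's loop: state = (count, seeking)
def vbStep (st : Nat × Bool) (ch : Char) : Nat × Bool :=
  if ch = '\n' then (st.1, true)
  else if st.2 && !([' ', '\t', '\r', '\x0c', '\x0b'].contains ch) then
    ((if ch = '*' ∨ ch = '-' then st.1 + 1 else st.1), false)
  else st

def verify_bullet_points_alt (text : String) (N : Int) : Bool :=
  decide (((text.toList.foldl vbStep (0, true)).1 : Int) = N)

-- ===== PRECONDITION & SPEC =====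
def Spec_verify_bullet_points (text : String) (N : Int) (out : Bool) : Prop := out = verify_bullet_points_alt text N
instance (text : String) (N : Int) (out : Bool) : Decidable (Spec_verify_bullet_points text N out) := by unfold Spec_verify_bullet_points; infer_instance

-- ===== CLAIM (what is proved, stated in full; the proofs are below) =====
def Claim_equal_verify_bullet_points : Prop := ∀ (text : String) (N : Int), Dom_verify_bullet_points text N → Spec_verify_bullet_points text N (verify_bullet_points text N)

-- ===== LEMMAS AND PROOFS =====

-- simple structural characterisation of split-on-'\n'
def myLines : List Char → List (List Char)
  | [] => [[]]
  | c :: rest =>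
    if c = '\n' then [] :: myLines rest
    else
      match myLines rest with
      | [] => [[c]]
      | L :: Ls => (c :: L) :: Ls

def consHead (pre : List Char) : List (List Char) → List (List Char)
  | [] => [pre]
  | L :: Ls => (pre ++ L) :: Ls

-- count of bullet lines over the rest of the text, given B's "seeking" state
def restCount : List Char → Bool → Nat
  | [], _ => 0
  | c :: rest, seeking =>
    if c = '\n' then restCount rest true
    else if seeking && !([' ', '\t', '\r', '\x0c', '\x0b'].contains c) then
      (if c = '*' ∨ c = '-' then 1 else 0) + restCount rest false
    else restCount rest seeking

lemma myLines_ne_nil (l : List Char) : myLines l ≠ [] := by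
  cases l with
  | nil => simp [myLines]
  | cons c rest =>
    simp only [myLines]
    split
    · simp
    · cases h : myLines rest <;> simp

lemma go_newline (fuel : Nat) (l cur : List Char) (acc : List (List Char))
    (h : l.length < fuel) :
    PySem.Chars.splitOn.go ['\n'] fuel l cur acc = acc.reverse ++ consHead cur.reverse (myLines l) := by
  induction fuel generalizing l cur acc with
  | zero => omega
  | succ fuel ih =>
    cases l with
    | nil =>
      rw [PySem.Chars.splitOn.go.eq_def]
      simp [myLines, consHead]
    | cons c rest =>
      rw [PySem.Chars.splitOn.go.eq_def]
      simp only [List.isPrefixOf, List.length_cons] at *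
      by_cases hc : c = '\n'
      · subst hc
        simp only [beq_self_eq_true, Bool.true_and, if_pos, List.length_nil,
          List.drop_succ_cons, List.drop_zero]
        rw [ih rest [] (cur.reverse :: acc) (by omega)]
        cases hml : myLines rest with
        | nil => exact absurd hml (myLines_ne_nil rest)
        | cons L Ls =>
          simp [myLines, consHead, hml]
      · have : (('\n' == c) && List.isPrefixOf [] rest) = false := by
          simp; intro hh; exact absurd hh.symm hc
        simp only [List.isPrefixOf] at this
        rw [if_neg (by simp [this])]
        rw [ih rest (c :: cur) acc (by omega)]
        cases hml : myLines rest with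
        | nil => exact absurd hml (myLines_ne_nil rest)
        | cons L Ls =>
          simp [myLines, consHead, hml, hc]

lemma splitOn_newline (l : List Char) : PySem.Chars.splitOn l ['\n'] = myLines l := by
  unfold PySem.Chars.splitOn
  rw [go_newline (l.length + 1) l [] [] (by omega)]
  cases hml : myLines l with
  | nil => exact absurd hml (myLines_ne_nil l)
  | cons L Ls => simp [consHead]

lemma rstrip_cons (c : Char) (l : List Char) (h : PySem.Chars.isspace c = false) :
    PySem.Chars.rstrip (c :: l) = c :: PySem.Chars.rstrip l := by
  unfold PySem.Chars.rstrip
  rw [List.reverse_cons, List.dropWhile_append]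
  split
  · next hnil =>
    rw [List.isEmpty_iff] at hnil
    simp [List.dropWhile, hnil, h]
  · simp

-- A's per-line predicate depends only on the first non-whitespace character
def pHead : List Char → Bool
  | [] => false
  | c :: _ => c = '*' ∨ c = '-'

lemma p_char (line : List Char) :
    (PySem.Chars.startswith (PySem.Chars.strip line) ['*'] ||
     PySem.Chars.startswith (PySem.Chars.strip line) ['-'])
    = pHead (line.dropWhile PySem.Chars.isspace) := by
  unfold PySem.Chars.strip PySem.Chars.lstrip
  cases hd : line.dropWhile PySem.Chars.isspace with
  | nil => simp [PySem.Chars.rstrip, PySem.Chars.startswith, pHead]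
  | cons c t =>
    have hc : PySem.Chars.isspace c = false := by
      have := List.head?_dropWhile_not PySem.Chars.isspace line
      rw [hd] at this; simpa using this
    rw [rstrip_cons c t hc]
    simp only [PySem.Chars.startswith, List.isPrefixOf, pHead, Bool.and_true]
    by_cases h1 : c = '*'
    · subst h1; decide
    · by_cases h2 : c = '-'
      · subst h2; decide
      · rw [beq_false_of_ne (Ne.symm h1), beq_false_of_ne (Ne.symm h2)]
        simp [h1, h2]

-- B's fold, started in any state, adds restCount
lemma foldl_vbStep (l : List Char) (cnt : Nat) (seeking : Bool) :
    (l.foldl vbStep (cnt, seeking)).1 = cnt + restCount l seeking := by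
  induction l generalizing cnt seeking with
  | nil => simp [restCount]
  | cons c rest ih =>
    simp only [List.foldl_cons, vbStep, restCount]
    by_cases h1 : c = '\n'
    · simp [h1, ih]
    · rw [if_neg h1, if_neg h1]
      by_cases h2 : (seeking && !([' ', '\t', '\r', '\x0c', '\x0b'].contains c)) = true
      · rw [if_pos h2, if_pos h2, ih]
        split <;> omega
      · rw [if_neg h2, if_neg h2, ih]

-- whitespace facts on the input domain
lemma isspace_of_ws {c : Char} (h : ([' ', '\t', '\r', '\x0c', '\x0b'].contains c) = true) :
    PySem.Chars.isspace c = true := by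
  simp only [List.contains_eq_mem, List.mem_cons, decide_eq_true_eq, List.not_mem_nil, or_false] at h
  rcases h with h | h | h | h | h <;> subst h <;> decide

lemma not_isspace_of_dom {c : Char} (hdom : pvDomChar c = true) (hnl : c ≠ '\n')
    (hws : ([' ', '\t', '\r', '\x0c', '\x0b'].contains c) = false) :
    PySem.Chars.isspace c = false := by
  simp only [List.contains_eq_mem, List.mem_cons, decide_eq_false_iff_not, List.not_mem_nil,
    or_false, not_or] at hws
  obtain ⟨h1, h2, h3, h4, h5⟩ := hws
  have n1 : c.toNat ≠ 32 := fun he => h1 (Char.ext (UInt32.toNat_inj.mp he))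
  have n2 : c.toNat ≠ 9 := fun he => h2 (Char.ext (UInt32.toNat_inj.mp he))
  have n3 : c.toNat ≠ 13 := fun he => h3 (Char.ext (UInt32.toNat_inj.mp he))
  have n4 : c.toNat ≠ 12 := fun he => h4 (Char.ext (UInt32.toNat_inj.mp he))
  have n5 : c.toNat ≠ 11 := fun he => h5 (Char.ext (UInt32.toNat_inj.mp he))
  have n6 : c.toNat ≠ 10 := fun he => hnl (Char.ext (UInt32.toNat_inj.mp he))
  simp only [pvDomChar, Bool.or_eq_true, Bool.and_eq_true, decide_eq_true_eq, beq_iff_eq] at hdom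
  simp only [PySem.Chars.isspace, Bool.or_eq_false_iff, Bool.and_eq_false_iff,
    decide_eq_false_iff_not]
  simp only [Char.toNat] at n1 n2 n3 n4 n5 n6 hdom ⊢
  omega

-- the core invariant: A's line count equals B's state-machine count
lemma restCount_ws (c : Char) (rest : List Char) (s : Bool) (hnl : c ≠ '\n')
    (hws : ([' ', '\t', '\r', '\x0c', '\x0b'].contains c) = true) :
    restCount (c :: rest) s = restCount rest s := by
  simp only [restCount, if_neg hnl, hws, Bool.not_true, Bool.and_false, Bool.false_eq_true,
    if_false]

lemma restCount_nonws_true (c : Char) (rest : List Char) (hnl : c ≠ '\n')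
    (hws : ([' ', '\t', '\r', '\x0c', '\x0b'].contains c) = false) :
    restCount (c :: rest) true = (if c = '*' ∨ c = '-' then 1 else 0) + restCount rest false := by
  simp only [restCount, if_neg hnl, hws, Bool.not_false, Bool.and_self, if_true]

lemma restCount_nonws_false (c : Char) (rest : List Char) (hnl : c ≠ '\n') :
    restCount (c :: rest) false = restCount rest false := by
  simp only [restCount, if_neg hnl, Bool.false_and, Bool.false_eq_true, if_false]

lemma main_count (l : List Char) (hdom : l.all pvDomChar = true) :
    (myLines l).countP (fun line => pHead (line.dropWhile PySem.Chars.isspace)) = restCount l true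
    ∧ ((myLines l).tail).countP (fun line => pHead (line.dropWhile PySem.Chars.isspace)) = restCount l false := by
  induction l with
  | nil => simp [myLines, restCount, pHead]
  | cons c rest ih =>
    simp only [List.all_cons, Bool.and_eq_true] at hdom
    obtain ⟨hc, hrest⟩ := hdom
    obtain ⟨ih1, ih2⟩ := ih hrest
    by_cases hnl : c = '\n'
    · subst hnl
      have hm : myLines ('\n' :: rest) = [] :: myLines rest := by simp [myLines]
      have hr : ∀ s, restCount ('\n' :: rest) s = restCount rest true := fun s => by
        simp [restCount]
      refine ⟨?_, ?_⟩
      · rw [hm, List.countP_cons, ih1, hr]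
        simp [pHead]
      · rw [hm, List.tail_cons, ih1, hr]
    · cases hml : myLines rest with
      | nil => exact absurd hml (myLines_ne_nil rest)
      | cons L Ls =>
        have hm : myLines (c :: rest) = (c :: L) :: Ls := by simp [myLines, hnl, hml]
        rw [hml] at ih1 ih2
        rw [List.tail_cons] at ih2
        by_cases hws : ([' ', '\t', '\r', '\x0c', '\x0b'].contains c) = true
        · have hsp := isspace_of_ws hws
          have hdw : List.dropWhile PySem.Chars.isspace (c :: L) = List.dropWhile PySem.Chars.isspace L := by
            simp [hsp]
          refine ⟨?_, ?_⟩
          · rw [hm, List.countP_cons]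
            rw [List.countP_cons] at ih1
            simp only [hdw]
            rw [ih1, restCount_ws c rest true hnl hws]
          · rw [hm, List.tail_cons, ih2, restCount_ws c rest false hnl hws]
        · have hsp := not_isspace_of_dom hc hnl (by simpa using hws)
          have hdw : List.dropWhile PySem.Chars.isspace (c :: L) = c :: L := by
            simp [hsp]
          have hwsf : ([' ', '\t', '\r', '\x0c', '\x0b'].contains c) = false := by
            simpa using hws
          refine ⟨?_, ?_⟩
          · rw [hm, List.countP_cons, ih2,
              restCount_nonws_true c rest hnl hwsf]
            simp only [hdw]
            have hp : pHead (c :: L) = decide (c = '*' ∨ c = '-') := by simp [pHead]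
            rw [hp]
            simp only [decide_eq_true_eq]
            split_ifs with h <;> omega
          · rw [hm, List.tail_cons, ih2, restCount_nonws_false c rest hnl]

-- ===== VERDICT (by name: the statement is the Claim_ definition above) =====
theorem verify_bullet_points_spec : Claim_equal_verify_bullet_points := by
  intro text N hdom
  unfold Spec_verify_bullet_points verify_bullet_points verify_bullet_points_alt
  have hdomc : text.toList.all pvDomChar = true := by
    simp only [Dom_verify_bullet_points, Bool.and_eq_true, pvDomStr] at hdom
    exact hdom.1
  rw [splitOn_newline]
  have hp : ∀ line : List Char,
      (PySem.Chars.startswith (PySem.Chars.strip line) ['*'] ||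
       PySem.Chars.startswith (PySem.Chars.strip line) ['-'])
      = pHead (line.dropWhile PySem.Chars.isspace) := p_char
  have hlen : ((myLines text.toList).filter (fun line =>
      PySem.Chars.startswith (PySem.Chars.strip line) ['*'] ||
      PySem.Chars.startswith (PySem.Chars.strip line) ['-'])).length
      = (myLines text.toList).countP (fun line => pHead (line.dropWhile PySem.Chars.isspace)) := by
    rw [← List.countP_eq_length_filter]
    exact List.countP_congr (fun line _ => by rw [hp])
  have hmain := (main_count text.toList hdomc).1
  have hfold := foldl_vbStep text.toList 0 true
  simp only [List.length_map, hlen, hmain, hfold, Nat.zero_add]
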